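-- pv_equiv track=rewrite | github.com/COSC-499-W2025/capstone-project-team-17-1 | src/capstone/zip_analyzer.py | _build_author_email_map
-- ===== SOURCE A (Python) =====
-- def _build_author_email_map(git_log_lines: list[str]) -> tuple[dict[str, str], set[str]]:
--     """Return ({author_name: real_email}, noreply_only_authors) from raw git log lines.
--
--     noreply_only_authors contains authors whose EVERY commit used a noreply/bot email
--     (i.e. they have no real email entry). These are typically automated accounts.
--     First real-email occurrence per author wins.
--     """
--     _NOREPLY_SUFFIXES = ("@users.noreply.github.com", "@noreply.github.com")
--     result: dict[str, str] = {}
--     seen_noreply: set[str] = set()   # authors seen with noreply email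
--
--     for line in git_log_lines:
--         if not line.startswith("commit:"):
--             continue
--         parts = line[len("commit:"):].split("|")
--         if len(parts) < 3:
--             continue
--         author = parts[1].strip()
--         email = parts[2].strip()
--         if not author or author.lower().endswith("[bot]") or not email:
--             continue
--         lowered = email.lower()
--         if lowered == "noreply@github.com" or any(lowered.endswith(s) for s in _NOREPLY_SUFFIXES):
--             seen_noreply.add(author)
--             continue
--         if author not in result:
--             result[author] = email
--
--     # Authors only ever seen with noreply emails and never with a real email
--     noreply_only = seen_noreply - result.keys()
--     return result, noreply_only
-- ===== SOURCE B (Python) =====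
-- def _build_author_email_map(git_log_lines):
--     """Two-pass rewrite: filter/parse every line into an event list, group real
--     emails per author, then derive the map and the noreply-only set."""
--     noreply = ("@users.noreply.github.com", "@noreply.github.com")
--
--     def parse(line):
--         if not line.startswith("commit:"):
--             return None
--         parts = line[len("commit:"):].split("|")
--         if len(parts) < 3:
--             return None
--         author = parts[1].strip()
--         email = parts[2].strip()
--         if not author or author.lower().endswith("[bot]") or not email:
--             return None
--         low = email.lower()
--         return (author, email, low == "noreply@github.com" or low.endswith(noreply))
--
--     events = [e for e in map(parse, git_log_lines) if e is not None]
--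
--     groups = {}
--     for author, email, is_noreply in events:
--         if not is_noreply:
--             groups[author] = groups.get(author, []) + [email]
--
--     result = {author: emails[0] for author, emails in groups.items()}
--     noreply_only = {author for author, _, is_noreply in events if is_noreply} - result.keys()
--     return result, noreply_only
-- ===== Notes on version B (the rewrite author's own statement) =====
-- stated objective: alternative
-- what changed: Replaces A's decide-inline single loop by a two-pass pipeline: first parse/filter every line into an event list (author, email, is_noreply), then group real emails per author into a dict of lists and derive the author-to-email map (first email of each group) and the noreply-only set by a set difference.
import Mathlib
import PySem

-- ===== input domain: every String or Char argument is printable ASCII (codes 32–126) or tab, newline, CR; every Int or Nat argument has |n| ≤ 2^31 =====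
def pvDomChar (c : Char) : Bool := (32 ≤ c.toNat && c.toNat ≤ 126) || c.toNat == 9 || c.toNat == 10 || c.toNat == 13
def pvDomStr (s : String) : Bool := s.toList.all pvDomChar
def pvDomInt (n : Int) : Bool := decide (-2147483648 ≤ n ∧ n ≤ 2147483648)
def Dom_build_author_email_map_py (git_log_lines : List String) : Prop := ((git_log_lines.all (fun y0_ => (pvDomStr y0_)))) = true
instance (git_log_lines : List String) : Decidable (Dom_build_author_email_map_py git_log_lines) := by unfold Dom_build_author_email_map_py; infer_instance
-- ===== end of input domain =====

-- B re-decomposes A's single inline loop into a parse pass, a grouping pass and a reduction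
-- (alternative decomposition, same asymptotic cost); equivalence is about the return value.

-- ===== PORT A =====
-- Loop body of A: one git log line updates (result, seen_noreply).
-- `split("|")` with the nonempty separator never returns none, so `.getD []` is exact;
-- `parts[1]`/`parts[2]` are in range under the `length < 3` guard, so pyGetD is exact.
def pvStepA (st : PySem.Dict String String × PySem.Set String) (line : String) :
    PySem.Dict String String × PySem.Set String :=
  if !(PySem.Str.startswith line "commit:") then st
  else
    let parts := (PySem.Str.split? (PySem.Str.slice line (some 7) none) "|").getD []
    if parts.length < 3 then st
    else
      let author := PySem.Str.strip (PySem.List.pyGetD parts 1 "")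
      let email := PySem.Str.strip (PySem.List.pyGetD parts 2 "")
      if author == "" || PySem.Str.endswith (PySem.Str.lower author) "[bot]" || email == "" then st
      else
        let lowered := PySem.Str.lower email
        if lowered == "noreply@github.com" ||
            ["@users.noreply.github.com", "@noreply.github.com"].any
              (fun s => PySem.Str.endswith lowered s) then
          (st.1, PySem.Set.add st.2 author)
        else if st.1.contains author then st
        else (st.1.insert author email, st.2)

def build_author_email_map_py (git_log_lines : List String) :
    (List (String × String)) × List String :=
  let fin := git_log_lines.foldl pvStepA (PySem.Dict.empty, PySem.Set.empty)
  (fin.1.items, PySem.Set.diff fin.2 fin.1.keys)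

-- ===== PORT B =====
-- B's `parse` helper: None for a filtered-out line, else (author, email, is_noreply).
def pvParse (line : String) : Option (String × String × Bool) :=
  if !(PySem.Str.startswith line "commit:") then none
  else
    let parts := (PySem.Str.split? (PySem.Str.slice line (some 7) none) "|").getD []
    if parts.length < 3 then none
    else
      let author := PySem.Str.strip (PySem.List.pyGetD parts 1 "")
      let email := PySem.Str.strip (PySem.List.pyGetD parts 2 "")
      if author == "" || PySem.Str.endswith (PySem.Str.lower author) "[bot]" || email == "" then none
      else
        let low := PySem.Str.lower email
        some (author, email,
          low == "noreply@github.com" ||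
            ["@users.noreply.github.com", "@noreply.github.com"].any
              (fun s => PySem.Str.endswith low s))

-- `emails[0]` is exact via pyGetD: every group list is built nonempty.
def build_author_email_map_py_alt (git_log_lines : List String) :
    (List (String × String)) × List String :=
  let events := git_log_lines.filterMap pvParse
  let groups := events.foldl
    (fun g e => if !e.2.2 then g.modify e.1 [] (fun es => es ++ [e.2.1]) else g)
    (PySem.Dict.empty : PySem.Dict String (List String))
  let result := PySem.Dict.ofList
    (groups.items.map (fun p => (p.1, PySem.List.pyGetD p.2 0 "")))
  let noreply_only := PySem.Set.diff
    (PySem.Set.ofList ((events.filter (fun e => e.2.2)).map (fun e => e.1))) result.keys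
  (result.items, noreply_only)

-- ===== PRECONDITION & SPEC =====
def Spec_build_author_email_map_py (git_log_lines : List String)
    (out : (List (String × String)) × List String) : Prop :=
  out = build_author_email_map_py_alt git_log_lines
instance (git_log_lines : List String) (out : (List (String × String)) × List String) :
    Decidable (Spec_build_author_email_map_py git_log_lines out) := by
  unfold Spec_build_author_email_map_py; infer_instance

-- ===== CLAIM (what is proved, stated in full; the proofs are below) =====
def Claim_equal_build_author_email_map_py : Prop :=
  ∀ (git_log_lines : List String), Dom_build_author_email_map_py git_log_lines →
    Spec_build_author_email_map_py git_log_lines (build_author_email_map_py git_log_lines)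

-- ===== LEMMAS AND PROOFS =====

-- Proof-side views of the two folds, over parsed events.
def pvStepE (st : PySem.Dict String String × PySem.Set String) (e : String × String × Bool) :
    PySem.Dict String String × PySem.Set String :=
  if e.2.2 then (st.1, PySem.Set.add st.2 e.1)
  else if st.1.contains e.1 then st
  else (st.1.insert e.1 e.2.1, st.2)

set_option maxHeartbeats 1000000 in
lemma pvStepA_eq_parse (st : PySem.Dict String String × PySem.Set String) (line : String) :
    pvStepA st line = (pvParse line).elim st (pvStepE st) := by
  unfold pvStepA pvParse
  dsimp only []
  set p := (PySem.Str.split? (PySem.Str.slice line (some 7) none) "|").getD [] with hp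
  set au := PySem.Str.strip (PySem.List.pyGetD p 1 "") with hau
  set em := PySem.Str.strip (PySem.List.pyGetD p 2 "") with hem
  set lo := PySem.Str.lower em with hlo
  set c1 := (au == "" || PySem.Str.endswith (PySem.Str.lower au) "[bot]" || em == "") with hc1
  set c2 := (lo == "noreply@github.com" ||
      ["@users.noreply.github.com", "@noreply.github.com"].any
        (fun s => PySem.Str.endswith lo s)) with hc2
  split_ifs with h1 h2 h3 h4
  · rfl
  · rfl
  · rfl
  · rw [Option.elim_some]
    simp [pvStepE, h4]
  · next h5 =>
      rw [Option.elim_some]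
      simp [pvStepE, h4, h5]
  · next h5 =>
      rw [Option.elim_some]
      simp [pvStepE, h4, h5]

def pvInsAbs (d : PySem.Dict String String) (e : String × String × Bool) :
    PySem.Dict String String :=
  if d.contains e.1 then d else d.insert e.1 e.2.1

def pvStepS (s : PySem.Set String) (e : String × String × Bool) : PySem.Set String :=
  if e.2.2 then PySem.Set.add s e.1 else s

def pvGrp (g : PySem.Dict String (List String)) (e : String × String × Bool) :
    PySem.Dict String (List String) :=
  g.modify e.1 [] (fun es => es ++ [e.2.1])

def pvFirsts (g : PySem.Dict String (List String)) : PySem.Dict String String :=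
  PySem.Dict.mk (g.items.map (fun p => (p.1, PySem.List.pyGetD p.2 0 "")))

lemma pvFoldA_eq (l : List String) (st : PySem.Dict String String × PySem.Set String) :
    l.foldl pvStepA st = (l.filterMap pvParse).foldl pvStepE st := by
  induction l generalizing st with
  | nil => rfl
  | cons x xs ih =>
      rw [List.foldl_cons, pvStepA_eq_parse, List.filterMap_cons]
      cases h : pvParse x <;> simp [ih]

lemma pvFoldE_split (es : List (String × String × Bool))
    (st : PySem.Dict String String × PySem.Set String) :
    es.foldl pvStepE st = (es.foldl (fun d e => if e.2.2 then d else pvInsAbs d e) st.1,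
      es.foldl pvStepS st.2) := by
  induction es generalizing st with
  | nil => rfl
  | cons e es ih =>
      rw [List.foldl_cons, ih]
      congr 1 <;> (rw [List.foldl_cons]; congr 1) <;>
        by_cases h : e.2.2 <;> simp [pvStepE, pvStepS, pvInsAbs, h] <;> split <;> rfl

lemma pvSeen_eq (es : List (String × String × Bool)) :
    es.foldl pvStepS [] = PySem.Set.ofList ((es.filter (fun e => e.2.2)).map (fun e => e.1)) := by
  have h1 : es.foldl pvStepS []
      = (es.filter (fun e => e.2.2)).foldl (fun s e => PySem.Set.add s e.1) [] := by
    rw [← PySem.List.foldl_if_eq_foldl_filter (fun e => e.2.2)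
      (fun s e => PySem.Set.add s e.1) es []]
    rfl
  rw [h1, ← PySem.Set.update_map_eq_foldl_add, PySem.Set.update_nil_left]

lemma pvRes_filter (es : List (String × String × Bool)) (d : PySem.Dict String String) :
    es.foldl (fun d e => if e.2.2 then d else pvInsAbs d e) d
      = (es.filter (fun e => !e.2.2)).foldl pvInsAbs d := by
  rw [← PySem.List.foldl_if_eq_foldl_filter (fun e => !e.2.2) pvInsAbs es d]
  apply PySem.List.foldl_congr_mem
  intro acc e _
  by_cases h : e.2.2 <;> simp [h]

lemma pvContains_firsts (g : PySem.Dict String (List String)) (k : String) :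
    (pvFirsts g).contains k = g.contains k := by
  simp [pvFirsts, PySem.Dict.contains, List.any_map, Function.comp_def]

lemma pvGrp_step (g : PySem.Dict String (List String)) (e : String × String × Bool)
    (hnd : g.keys.Nodup) (hne : ∀ p ∈ g.items, p.2 ≠ []) :
    pvInsAbs (pvFirsts g) e = pvFirsts (pvGrp g e)
      ∧ (pvGrp g e).keys.Nodup ∧ ∀ p ∈ (pvGrp g e).items, p.2 ≠ [] := by
  by_cases hc : g.contains e.1 = true
  · have hitems : (pvGrp g e).items
        = g.items.map (fun p => if p.1 == e.1 then (e.1, g.getD e.1 [] ++ [e.2.1]) else p) := by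
      unfold pvGrp PySem.Dict.modify
      exact PySem.Dict.items_insert_of_contains _ _ hc
    have hmapeq : ∀ p ∈ g.items,
        (fun q => (q.1, PySem.List.pyGetD q.2 0 ""))
          ((fun p => if p.1 == e.1 then (e.1, g.getD e.1 [] ++ [e.2.1]) else p) p)
        = (p.1, PySem.List.pyGetD p.2 0 "") := by
      intro p hp
      by_cases hpk : p.1 == e.1
      · have hk : p.1 = e.1 := by simpa using hpk
        have hmem : (e.1, p.2) ∈ g.items := by rw [← hk]; exact hp
        have hgd : g.getD e.1 [] = p.2 := PySem.Dict.getD_of_mem_items _ hmem hnd []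
        have hne' : p.2 ≠ [] := hne p hp
        simp only [hpk, if_true, hgd]
        cases h2 : p.2 with
        | nil => exact absurd h2 hne'
        | cons a t => simp [hk, PySem.List.pyGetD]
      · simp [hpk]
    refine ⟨?_, ?_, ?_⟩
    · rw [pvInsAbs, pvContains_firsts, hc, if_pos rfl]
      unfold pvFirsts
      rw [hitems, List.map_map]
      congr 1
      exact (List.map_congr_left hmapeq).symm
    · have : (pvGrp g e).keys = g.keys := by
        unfold PySem.Dict.keys
        rw [hitems, List.map_map]
        apply List.map_congr_left
        intro p hp
        by_cases hpk : p.1 = e.1 <;> simp [hpk]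
      rw [this]; exact hnd
    · rw [hitems]
      intro p hp
      rcases List.mem_map.1 hp with ⟨q, hq, rfl⟩
      by_cases hpk : q.1 == e.1 <;> simp [hpk]
      exact hne q hq
  · have hc' : g.contains e.1 = false := by simpa using hc
    have hgd : g.getD e.1 [] = [] := PySem.Dict.getD_of_not_contains _ [] hc'
    have hitems : (pvGrp g e).items = g.items ++ [(e.1, [e.2.1])] := by
      unfold pvGrp PySem.Dict.modify
      rw [hgd]
      exact PySem.Dict.items_insert_of_not_contains _ _ hc'
    have hnotmem : e.1 ∉ g.keys := by
      intro hmem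
      rw [← PySem.Dict.contains_iff_mem_keys] at hmem
      simp [hc'] at hmem
    refine ⟨?_, ?_, ?_⟩
    · have hcf : (pvFirsts g).contains e.1 = false := by rw [pvContains_firsts]; exact hc'
      have hlhs := PySem.Dict.items_insert_of_not_contains (pvFirsts g) e.2.1 hcf
      rw [pvInsAbs, hcf]
      simp only [Bool.false_eq_true, if_false]
      apply PySem.Dict.ext
      rw [hlhs]
      unfold pvFirsts
      rw [hitems]
      simp [PySem.List.pyGetD_zero_cons]
    · unfold PySem.Dict.keys
      rw [hitems]
      simp only [List.map_append, List.map_cons, List.map_nil]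
      simp only [List.nodup_append]
      refine ⟨hnd, List.nodup_singleton _, ?_⟩
      intro a ha b hb
      simp only [List.mem_singleton] at hb
      subst hb
      exact fun h => hnotmem (h ▸ ha)
    · rw [hitems]
      intro p hp
      rcases List.mem_append.1 hp with h | h
      · exact hne p h
      · simp at h; subst h; simp

lemma pvFold_main (es : List (String × String × Bool)) (g : PySem.Dict String (List String))
    (hnd : g.keys.Nodup) (hne : ∀ p ∈ g.items, p.2 ≠ []) :
    es.foldl pvInsAbs (pvFirsts g) = pvFirsts (es.foldl pvGrp g)
      ∧ (es.foldl pvGrp g).keys.Nodup := by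
  induction es generalizing g with
  | nil => exact ⟨rfl, hnd⟩
  | cons e es ih =>
      obtain ⟨hstep, hnd', hne'⟩ := pvGrp_step g e hnd hne
      rw [List.foldl_cons, List.foldl_cons, hstep]
      exact ih (pvGrp g e) hnd' hne'

lemma pvUpdate_eq_mk (pairs : List (String × String)) (d : PySem.Dict String String)
    (hfresh : ∀ p ∈ pairs, d.contains p.1 = false) (hnd : (pairs.map Prod.fst).Nodup) :
    d.update pairs = PySem.Dict.mk (d.items ++ pairs) := by
  induction pairs generalizing d with
  | nil => apply PySem.Dict.ext; simp [PySem.Dict.update]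
  | cons p ps ih =>
      have hf : d.contains p.1 = false := hfresh p (by simp)
      have hins : d.insert p.1 p.2 = PySem.Dict.mk (d.items ++ [p]) := by
        apply PySem.Dict.ext
        rw [PySem.Dict.items_insert_of_not_contains _ _ hf]
      have hstep : d.update (p :: ps) = (d.insert p.1 p.2).update ps := rfl
      rw [hstep, hins]
      have hfresh' : ∀ q ∈ ps, (PySem.Dict.mk (d.items ++ [p])).contains q.1 = false := by
        intro q hq
        have h1 : d.contains q.1 = false := hfresh q (by simp [hq])
        have h2 : p.1 ≠ q.1 := by
          simp only [List.map_cons, List.nodup_cons] at hnd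
          exact fun h => hnd.1 (h ▸ List.mem_map.2 ⟨q, hq, rfl⟩)
        simp only [PySem.Dict.contains, List.any_append] at h1 ⊢
        simp [h1, h2]
      have hnd' : (ps.map Prod.fst).Nodup := by
        simp only [List.map_cons, List.nodup_cons] at hnd
        exact hnd.2
      rw [ih _ hfresh' hnd']
      apply PySem.Dict.ext
      simp

lemma pvOfList_eq_mk (pairs : List (String × String)) (hnd : (pairs.map Prod.fst).Nodup) :
    PySem.Dict.ofList pairs = PySem.Dict.mk pairs := by
  have h := pvUpdate_eq_mk pairs PySem.Dict.empty (fun p _ => PySem.Dict.contains_empty p.1) hnd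
  rw [PySem.Dict.ofList, h]
  apply PySem.Dict.ext
  simp [PySem.Dict.empty]

theorem final_eq (lines : List String) :
    (let fin := lines.foldl pvStepA (PySem.Dict.empty, PySem.Set.empty)
     ((fin.1.items, PySem.Set.diff fin.2 fin.1.keys) :
        (List (String × String)) × List String))
    = (let events := lines.filterMap pvParse
       let groups := events.foldl
         (fun g e => if !e.2.2 then g.modify e.1 [] (fun es => es ++ [e.2.1]) else g)
         (PySem.Dict.empty : PySem.Dict String (List String))
       let result := PySem.Dict.ofList
         (groups.items.map (fun p => (p.1, PySem.List.pyGetD p.2 0 "")))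
       (result.items, PySem.Set.diff
         (PySem.Set.ofList ((events.filter (fun e => e.2.2)).map (fun e => e.1))) result.keys)) := by
  dsimp only []
  set events := lines.filterMap pvParse with hev
  set real := events.filter (fun e => !e.2.2) with hreal
  set G := real.foldl pvGrp PySem.Dict.empty with hG
  have hmain := pvFold_main real PySem.Dict.empty (by simp [PySem.Dict.keys, PySem.Dict.empty])
      (by simp [PySem.Dict.empty])
  have hfirsts_empty : pvFirsts PySem.Dict.empty = PySem.Dict.empty := rfl
  have hB : events.foldl
      (fun g e => if !e.2.2 then g.modify e.1 [] (fun es => es ++ [e.2.1]) else g)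
      (PySem.Dict.empty : PySem.Dict String (List String)) = G :=
    PySem.List.foldl_if_eq_foldl_filter (fun e => !e.2.2) pvGrp events PySem.Dict.empty
  have hndmap : ((G.items.map (fun p => (p.1, PySem.List.pyGetD p.2 0 ""))).map Prod.fst).Nodup := by
    rw [List.map_map]
    have : (Prod.fst ∘ fun p : String × List String => (p.1, PySem.List.pyGetD p.2 0 ""))
        = fun p => p.1 := rfl
    rw [this]
    exact hmain.2
  have hres : PySem.Dict.ofList (G.items.map (fun p => (p.1, PySem.List.pyGetD p.2 0 "")))
      = pvFirsts G := by
    rw [pvOfList_eq_mk _ hndmap]; rfl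
  have hfin : lines.foldl pvStepA (PySem.Dict.empty, PySem.Set.empty)
      = (pvFirsts G, PySem.Set.ofList ((events.filter (fun e => e.2.2)).map (fun e => e.1))) := by
    rw [pvFoldA_eq, ← hev, pvFoldE_split]
    congr 1
    · rw [pvRes_filter, ← hreal, ← hfirsts_empty] at *
      exact hmain.1
    · exact pvSeen_eq events
  rw [hfin, hB, hres]

-- ===== VERDICT (by name: the statement is the Claim_ definition above) =====
theorem build_author_email_map_py_spec : Claim_equal_build_author_email_map_py := by
  intro git_log_lines _
  unfold Spec_build_author_email_map_py
  unfold build_author_email_map_py build_author_email_map_py_alt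
  exact final_eq git_log_lines
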